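-- pv_equiv track=rewrite | github.com/nOOne-is-hier/TIS | SWEA/3234.준환이의_양팔저울/3234.준환이의_양팔저울.py | solve
-- ===== SOURCE A (Python) =====
-- def solve(N, weights):
--     total_weight = sum(weights)
--     max_weight = total_weight + 1
--     dp = [[0] * max_weight for _ in range(1 << N)]
--     dp[0][0] = 1
--
--     for mask in range(1 << N):
--         for left in range(total_weight + 1):
--             if dp[mask][left] == 0:
--                 continue
--             right = sum(weights[i] for i in range(N) if mask & (1 << i)) - left
--             for i in range(N):
--                 if mask & (1 << i) == 0:  # 무게추 i가 아직 사용되지 않은 경우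
--                     new_mask = mask | (1 << i)
--                     # 왼쪽에 추가하는 경우
--                     dp[new_mask][left + weights[i]] += dp[mask][left]
--                     # 오른쪽에 추가하는 경우, 조건 확인
--                     if left >= right + weights[i]:
--                         dp[new_mask][left] += dp[mask][left]
--
--     return sum(dp[(1 << N) - 1])
-- ===== SOURCE B (Python) =====
-- def solve(N, weights):
--     # Top-down memoized recursion on (mask, diff) with the single signed
--     # balance diff = left - right, instead of A's dense [mask][left] table.
--     ws = weights[:N]
--     full = (1 << N) - 1
--     memo = {}
--
--     def count(mask, diff):
--         if mask == full:
--             return 1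
--         key = (mask, diff)
--         if key in memo:
--             return memo[key]
--         total = 0
--         for i in range(N):
--             if not (mask >> i) & 1:
--                 w = ws[i]
--                 total += count(mask | (1 << i), diff + w)
--                 if diff >= w:
--                     total += count(mask | (1 << i), diff - w)
--         memo[key] = total
--         return total
--
--     return count(0, 0)
-- ===== Notes on version B (the rewrite author's own statement) =====
-- stated objective: alternative
-- what changed: A sweeps a dense bottom-up dp[mask][left] table of size 2^N*(sum+1) and finally sums the full-mask row; B is a top-down memoized recursion count(mask, diff) on the single signed balance diff = left - right, started at count(0,0), placing each unused weight on the left (always) or on the right (when diff >= w).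
-- outside the precondition, e.g. on solve(2, [-3, 1, 4, 5, -3]): A returns 6, B returns 5; on solve(1, [-1, 3]): A returns 2, B returns 2; on solve(2, [-1, 3]): A raises IndexError, B returns 4
import Mathlib
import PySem

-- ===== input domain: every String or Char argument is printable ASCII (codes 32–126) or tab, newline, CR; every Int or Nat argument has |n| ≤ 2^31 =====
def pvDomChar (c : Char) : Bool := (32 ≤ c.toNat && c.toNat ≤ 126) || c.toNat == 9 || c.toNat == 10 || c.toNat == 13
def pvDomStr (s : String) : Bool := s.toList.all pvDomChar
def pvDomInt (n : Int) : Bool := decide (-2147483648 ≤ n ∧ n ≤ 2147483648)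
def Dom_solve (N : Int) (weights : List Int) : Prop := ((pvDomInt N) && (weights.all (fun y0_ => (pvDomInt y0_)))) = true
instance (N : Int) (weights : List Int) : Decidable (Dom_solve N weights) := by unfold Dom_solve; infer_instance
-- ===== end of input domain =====

-- B replaces A's dense bottom-up [mask][left] table sweep by a top-down memoized recursion on (mask, diff = left - right);
-- objective: alternative decomposition (neither side mutates its arguments).

-- ===== PORT A =====
-- dp[m][l]: two-level read/write with Python index semantics (negative index wraps; out-of-range write is IndexError
-- in Python and a no-op here — Pre_ keeps every index in range)
def pvGet2 (dp : List (List Int)) (m l : Int) : Int :=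
  PySem.List.pyGetD ((PySem.List.pyGet? dp m).getD []) l 0

def pvSet2 (dp : List (List Int)) (m l : Int) (v : Int) : List (List Int) :=
  match PySem.List.pyGet? dp m with
  | none => dp
  | some row => PySem.List.pySetD dp m (PySem.List.pySetD row l v)

-- body of 'for i in range(N)': the two conditional '+=' scatters; mask, i ≥ 0 in every call,
-- so 'mask & (1 << i) == 0' is ported exactly as '¬ testBit' on the underlying naturals
def pvInnerA (weights : List Int) (mask left right : Int) (dp : List (List Int)) (i : Int) : List (List Int) :=
  if mask.toNat.testBit i.toNat = false then
    let newMask : Int := ((mask.toNat ||| 1 <<< i.toNat : Nat) : Int)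
    let wi := PySem.List.pyGetD weights i 0
    let dp' := pvSet2 dp newMask (left + wi) (pvGet2 dp newMask (left + wi) + pvGet2 dp mask left)
    if right + wi ≤ left then pvSet2 dp' newMask left (pvGet2 dp' newMask left + pvGet2 dp' mask left) else dp'
  else dp

-- body of 'for left in range(total_weight + 1)'
def pvLeftA (N : Int) (weights : List Int) (mask : Int) (dp : List (List Int)) (left : Int) : List (List Int) :=
  if pvGet2 dp mask left = 0 then dp
  else
    let right := ((PySem.List.pyRange 0 N 1).foldl (fun acc i =>
        if mask.toNat.testBit i.toNat then acc + PySem.List.pyGetD weights i 0 else acc) 0) - left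
    (PySem.List.pyRange 0 N 1).foldl (pvInnerA weights mask left right) dp

def solve (N : Int) (weights : List Int) : Int :=
  let total := weights.sum
  let nMasks : Nat := 2 ^ N.toNat  -- 1 << N (exact for N ≥ 0; Python raises ValueError on N < 0, outside Pre_)
  let dp0 : List (List Int) :=
    List.replicate nMasks (List.replicate (total + 1).toNat 0)  -- [0]*max_weight is [] for max_weight ≤ 0, as .toNat gives
  let dp1 := pvSet2 dp0 0 0 1  -- dp[0][0] = 1
  let dpF := (PySem.List.pyRange 0 (nMasks : Int) 1).foldl
    (fun dp mask => (PySem.List.pyRange 0 (total + 1) 1).foldl (pvLeftA N weights mask) dp) dp1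
  ((PySem.List.pyGet? dpF ((nMasks : Int) - 1)).getD []).sum

-- ===== PORT B =====
-- number of weight indices i < n unused in mask: termination measure of Source B's recursion
def pvUnused (n mask : Nat) : Nat :=
  ((Finset.range n).filter (fun i => mask.testBit i = false)).card

theorem pvUnused_or_lt (n mask i : Nat) (hi : i < n) (hb : mask.testBit i = false) :
    pvUnused n (mask ||| 1 <<< i) < pvUnused n mask := by
  apply Finset.card_lt_card
  constructor
  · intro j hj
    simp only [Finset.mem_filter, Finset.mem_range] at hj ⊢
    refine ⟨hj.1, ?_⟩
    have := hj.2
    simp only [Nat.testBit_or] at this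
    cases h : mask.testBit j
    · rfl
    · simp [h] at this
  · intro hsub
    have hi' : i ∈ (Finset.range n).filter (fun j => mask.testBit j = false) := by
      simp [Finset.mem_filter, Finset.mem_range, hi, hb]
    have := hsub hi'
    simp only [Finset.mem_filter, Finset.mem_range, Nat.testBit_or] at this
    have h2 : (1 <<< i : Nat).testBit i = true := by
      simp [Nat.shiftLeft_eq]
    simp [h2] at this

mutual
/-- count(mask, diff) of Source B, with the memo dict threaded explicitly -/
def pvCount (n : Nat) (ws : List Int) (memo : PySem.Dict (Nat × Int) Int) (mask : Nat) (diff : Int) :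
    Int × PySem.Dict (Nat × Int) Int :=
  if mask = 2 ^ n - 1 then (1, memo)
  else
    match memo.get? (mask, diff) with
    | some v => (v, memo)
    | none =>
      let r := pvLoop n ws (List.range n).attach memo mask diff 0
      (r.1, r.2.insert (mask, diff) r.1)
termination_by (pvUnused n mask, n + 2)

/-- the 'for i in range(N)' body of count -/
def pvLoop (n : Nat) (ws : List Int) (is : List {i // i ∈ List.range n})
    (memo : PySem.Dict (Nat × Int) Int) (mask : Nat) (diff : Int) (acc : Int) :
    Int × PySem.Dict (Nat × Int) Int :=
  match is with
  | [] => (acc, memo)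
  | ⟨i, him⟩ :: rest =>
    if hb : mask.testBit i = false then   -- not (mask >> i) & 1
      let w := PySem.List.pyGetD ws (i : Int) 0
      let r1 := pvCount n ws memo (mask ||| 1 <<< i) (diff + w)
      if w ≤ diff then
        let r2 := pvCount n ws r1.2 (mask ||| 1 <<< i) (diff - w)
        pvLoop n ws rest r2.2 mask diff (acc + r1.1 + r2.1)
      else pvLoop n ws rest r1.2 mask diff (acc + r1.1)
    else pvLoop n ws rest memo mask diff acc
termination_by (pvUnused n mask, is.length + 1)
decreasing_by
  all_goals first
    | exact Prod.Lex.left _ _ (pvUnused_or_lt n mask i (List.mem_range.mp him) hb)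
    | (apply Prod.Lex.right; simp)
end

def solve_alt (N : Int) (weights : List Int) : Int :=
  let ws := PySem.List.slice weights none (some N)   -- weights[:N]
  (pvCount N.toNat ws PySem.Dict.empty 0 0).1   -- loop bound range(N) / full mask (1<<N)-1: N ≥ 0 under Pre_

-- ===== PRECONDITION & SPEC =====
-- Pre_ excludes: N < 0 (Python raises ValueError), N > len(weights) (IndexError), and weight lists that break the
-- dp table bounds — a negative weight among the first N, or an ignored tail summing negative — on which A raises
-- IndexError for most inputs and on the remaining ones silently accumulates counts at wrapped-around negative list
-- indices, an artefact of Python indexing that no caller could intend.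
def Pre_solve (N : Int) (weights : List Int) : Prop :=
  0 ≤ N ∧ N.toNat ≤ weights.length ∧ (∀ w ∈ weights.take N.toNat, 0 ≤ w) ∧
    0 ≤ (weights.drop N.toNat).sum
instance (N : Int) (weights : List Int) : Decidable (Pre_solve N weights) := by
  unfold Pre_solve; infer_instance

def pvWitness_solve : Int × List Int := (2, [3, 1])

def Spec_solve (N : Int) (weights : List Int) (out : Int) : Prop := out = solve_alt N weights
instance (N : Int) (weights : List Int) (out : Int) : Decidable (Spec_solve N weights out) := by
  unfold Spec_solve; infer_instance

-- ===== CLAIM (what is proved, stated in full; the proofs are below) =====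
def Claim_equal_solve : Prop := ∀ (N : Int) (weights : List Int), Dom_solve N weights →
  Pre_solve N weights → Spec_solve N weights (solve N weights)

-- ===== LEMMAS AND PROOFS =====

/-- weight of index i (0 beyond the list; every use is at i < n ≤ len) -/
def pvWgt (W : List Int) (i : Nat) : Int := W.getD i 0

/-- sum of the weights selected by mask among the first n -/
def pvSB (n : Nat) (W : List Int) (mask : Nat) : Int :=
  ∑ i ∈ Finset.range n, if mask.testBit i then pvWgt W i else 0

/-- specification value: number of valid completions from (mask, diff); B's count, memo-free -/
def pvC (n : Nat) (W : List Int) (mask : Nat) (diff : Int) : Int :=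
  if mask = 2 ^ n - 1 then 1
  else ((List.range n).attach.map (fun x =>
      if hb : mask.testBit x.1 = false then
        pvC n W (mask ||| 1 <<< x.1) (diff + pvWgt W x.1)
        + (if pvWgt W x.1 ≤ diff then pvC n W (mask ||| 1 <<< x.1) (diff - pvWgt W x.1) else 0)
      else 0)).sum
termination_by pvUnused n mask
decreasing_by
  · exact pvUnused_or_lt n mask x.1 (List.mem_range.mp x.2) hb
  · exact pvUnused_or_lt n mask x.1 (List.mem_range.mp x.2) hb

theorem pvC_full (n : Nat) (W : List Int) (d : Int) : pvC n W (2 ^ n - 1) d = 1 := by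
  rw [pvC]; simp

/-- the per-index contribution in pvC's recurrence -/
def pvF (n : Nat) (W : List Int) (mask : Nat) (d : Int) (i : Nat) : Int :=
  if mask.testBit i = false then
    pvC n W (mask ||| 1 <<< i) (d + pvWgt W i)
    + (if pvWgt W i ≤ d then pvC n W (mask ||| 1 <<< i) (d - pvWgt W i) else 0)
  else 0

theorem pvC_rec (n : Nat) (W : List Int) (mask : Nat) (d : Int) (h : mask ≠ 2 ^ n - 1) :
    pvC n W mask d = ((List.range n).map (pvF n W mask d)).sum := by
  rw [pvC, if_neg h]
  congr 1
  rw [← List.attach_map_val (l := List.range n) (f := pvF n W mask d)]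
  apply List.map_congr_left
  intro x _
  simp only [pvF, dite_eq_ite]

-- ---- B-side correctness ----
def pvMemoOK (n : Nat) (W : List Int) (memo : PySem.Dict (Nat × Int) Int) : Prop :=
  ∀ p v, memo.get? p = some v → v = pvC n W p.1 p.2

theorem pvLoop_ok (n : Nat) (W ws : List Int)
    (hws : ∀ i : Nat, i < n → PySem.List.pyGetD ws (i : Int) 0 = pvWgt W i)
    (mask : Nat) (diff : Int)
    (ih : ∀ mask' (diff' : Int) memo', pvUnused n mask' < pvUnused n mask → pvMemoOK n W memo' →
      (pvCount n ws memo' mask' diff').1 = pvC n W mask' diff' ∧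
      pvMemoOK n W (pvCount n ws memo' mask' diff').2) :
    ∀ (is : List {i // i ∈ List.range n}) (memo : PySem.Dict (Nat × Int) Int) (acc : Int),
      pvMemoOK n W memo →
      (pvLoop n ws is memo mask diff acc).1 = acc + (is.map (fun x => pvF n W mask diff x.1)).sum ∧
      pvMemoOK n W (pvLoop n ws is memo mask diff acc).2 := by
  intro is
  induction is with
  | nil =>
    intro memo acc hm
    rw [pvLoop]
    simpa using hm
  | cons x rest ihl =>
    obtain ⟨i, him⟩ := x
    intro memo acc hm
    have hi : i < n := List.mem_range.mp him
    have hw : PySem.List.pyGetD ws (i : Int) 0 = pvWgt W i := hws i hi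
    rw [pvLoop]
    by_cases hbit : mask.testBit i = false
    · rw [dif_pos hbit]
      have hmu : pvUnused n (mask ||| 1 <<< i) < pvUnused n mask := pvUnused_or_lt n mask i hi hbit
      set r1 := pvCount n ws memo (mask ||| 1 <<< i) (diff + PySem.List.pyGetD ws (i : Int) 0) with hr1
      have c1 := ih (mask ||| 1 <<< i) (diff + PySem.List.pyGetD ws (i : Int) 0) memo hmu hm
      by_cases hle : PySem.List.pyGetD ws (i : Int) 0 ≤ diff
      · rw [if_pos hle]
        set r2 := pvCount n ws r1.2 (mask ||| 1 <<< i) (diff - PySem.List.pyGetD ws (i : Int) 0) with hr2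
        have c2 := ih (mask ||| 1 <<< i) (diff - PySem.List.pyGetD ws (i : Int) 0) r1.2 hmu c1.2
        have hrest := ihl r2.2 (acc + r1.1 + r2.1) c2.2
        refine ⟨?_, hrest.2⟩
        rw [hrest.1, List.map_cons, List.sum_cons]
        have hF : pvF n W mask diff i
            = pvC n W (mask ||| 1 <<< i) (diff + pvWgt W i)
              + pvC n W (mask ||| 1 <<< i) (diff - pvWgt W i) := by
          rw [pvF, if_pos hbit, if_pos (by rw [← hw]; exact hle)]
        rw [hF, c1.1, c2.1, hw]
        ring
      · rw [if_neg hle]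
        have hrest := ihl r1.2 (acc + r1.1) c1.2
        refine ⟨?_, hrest.2⟩
        rw [hrest.1, List.map_cons, List.sum_cons]
        have hF : pvF n W mask diff i = pvC n W (mask ||| 1 <<< i) (diff + pvWgt W i) := by
          rw [pvF, if_pos hbit, if_neg (by rw [← hw]; exact hle)]
          ring
        rw [hF, c1.1, hw]
        ring
    · rw [dif_neg hbit]
      have hrest := ihl memo acc hm
      refine ⟨?_, hrest.2⟩
      rw [hrest.1, List.map_cons, List.sum_cons]
      have hF : pvF n W mask diff i = 0 := by rw [pvF, if_neg hbit]
      rw [hF]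
      ring

theorem pvCount_ok (n : Nat) (W ws : List Int)
    (hws : ∀ i : Nat, i < n → PySem.List.pyGetD ws (i : Int) 0 = pvWgt W i) :
    ∀ (K : Nat) (mask : Nat) (diff : Int) (memo : PySem.Dict (Nat × Int) Int),
      pvUnused n mask < K → pvMemoOK n W memo →
      (pvCount n ws memo mask diff).1 = pvC n W mask diff ∧
      pvMemoOK n W (pvCount n ws memo mask diff).2 := by
  intro K
  induction K with
  | zero => intro mask diff memo h; omega
  | succ K ihK =>
    intro mask diff memo hK hm
    rw [pvCount]
    by_cases hfull : mask = 2 ^ n - 1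
    · rw [if_pos hfull]
      exact ⟨by rw [hfull, pvC_full], hm⟩
    · rw [if_neg hfull]
      cases hget : memo.get? (mask, diff) with
      | some v =>
        exact ⟨hm (mask, diff) v hget, hm⟩
      | none =>
        have hloop := pvLoop_ok n W ws hws mask diff
          (fun mask' diff' memo' hlt hm' => ihK mask' diff' memo' (by omega) hm')
          (List.range n).attach memo 0 hm
        have hval : (pvLoop n ws (List.range n).attach memo mask diff 0).1 = pvC n W mask diff := by
          rw [hloop.1, pvC_rec n W mask diff hfull,
            List.attach_map_val (l := List.range n) (f := pvF n W mask diff)]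
          ring
        refine ⟨hval, ?_⟩
        intro p v hpv
        rw [PySem.Dict.get?_insert] at hpv
        by_cases hp : p = (mask, diff)
        · rw [if_pos hp] at hpv
          cases hpv
          rw [hval, hp]
        · rw [if_neg hp] at hpv
          exact hloop.2 p v hpv

theorem solve_alt_eq (N : Int) (weights : List Int) (h : Pre_solve N weights) :
    solve_alt N weights = pvC N.toNat weights 0 0 := by
  obtain ⟨hN, hlen, _, _⟩ := h
  have hws : ∀ i : Nat, i < N.toNat →
      PySem.List.pyGetD (PySem.List.slice weights none (some N)) (i : Int) 0 = pvWgt weights i := by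
    intro i hi
    rw [PySem.List.slice_to weights hN, PySem.List.pyGetD_natCast]
    simp [List.getD_eq_getElem?_getD, List.getElem?_take, hi, pvWgt]
  exact (pvCount_ok N.toNat weights _ hws (pvUnused N.toNat 0 + 1) 0 0 PySem.Dict.empty
    (by omega) (by intro p v hpv; rw [PySem.Dict.get?_empty] at hpv; cases hpv)).1

-- ---- A-side: table state ----
def pvG (dp : List (List Int)) (m l : Nat) : Int := (dp.getD m []).getD l 0

def pvS (dp : List (List Int)) (m l : Nat) (v : Int) : List (List Int) :=
  dp.set m ((dp.getD m []).set l v)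

def pvShape (n t : Nat) (dp : List (List Int)) : Prop :=
  dp.length = 2 ^ n ∧ ∀ row ∈ dp, row.length = t + 1

def pvSupp (n : Nat) (W : List Int) (dp : List (List Int)) : Prop :=
  ∀ m l : Nat, pvG dp m l ≠ 0 → (l : Int) ≤ pvSB n W m

def pvPhi (n : Nat) (W : List Int) (t lo : Nat) (dp : List (List Int)) : Int :=
  ∑ m ∈ Finset.Ico lo (2 ^ n), ∑ l ∈ Finset.range (t + 1),
    pvG dp m l * pvC n W m (2 * (l : Int) - pvSB n W m)

theorem pvGet2_cast (dp : List (List Int)) (m l : Nat) : pvGet2 dp (m : Int) (l : Int) = pvG dp m l := by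
  simp [pvGet2, pvG, PySem.List.pyGet?_natCast, PySem.List.pyGetD_natCast,
    List.getD_eq_getElem?_getD]

theorem pvSet2_cast (dp : List (List Int)) (m l : Nat) (v : Int) (hm : m < dp.length) :
    pvSet2 dp (m : Int) (l : Int) v = pvS dp m l v := by
  unfold pvSet2 pvS
  rw [PySem.List.pyGet?_natCast, List.getElem?_eq_getElem hm]
  simp [PySem.List.pySetD_natCast, List.getD_eq_getElem?_getD, List.getElem?_eq_getElem hm]

theorem pvG_pvS (dp : List (List Int)) (a b : Nat) (v : Int) (ha : a < dp.length)
    (hb : b < (dp.getD a []).length) (m l : Nat) :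
    pvG (pvS dp a b v) m l = if m = a ∧ l = b then v else pvG dp m l := by
  unfold pvG pvS
  by_cases hma : m = a
  · subst hma
    have h1 : (dp.set m ((dp.getD m []).set b v)).getD m [] = (dp.getD m []).set b v := by
      simp [List.getD_eq_getElem?_getD, ha]
    rw [h1]
    by_cases hlb : l = b
    · subst hlb
      have h2 : ((dp.getD m []).set l v).getD l 0 = v := by
        rw [List.getD_eq_getElem?_getD] at hb
        simp [List.getD_eq_getElem?_getD, hb]
      rw [h2]; simp
    · have h2 : ((dp.getD m []).set b v).getD l 0 = (dp.getD m []).getD l 0 := by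
        simp [List.getD_eq_getElem?_getD, List.getElem?_set, (Ne.symm hlb : b ≠ l)]
      rw [h2]; simp [hlb]
  · have h1 : (dp.set a ((dp.getD a []).set b v)).getD m [] = dp.getD m [] := by
      simp [List.getD_eq_getElem?_getD, List.getElem?_set, (Ne.symm hma : a ≠ m)]
    rw [h1]; simp [hma]

theorem pvShape_pvS (n t : Nat) (dp : List (List Int)) (hs : pvShape n t dp) (a b : Nat) (v : Int) :
    pvShape n t (pvS dp a b v) := by
  obtain ⟨hlen, hrow⟩ := hs
  by_cases ha : a < dp.length
  · refine ⟨by simpa [pvS] using hlen, ?_⟩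
    intro row hmem
    rcases List.mem_or_eq_of_mem_set hmem with h | h
    · exact hrow row h
    · subst h
      rw [List.length_set]
      exact hrow _ (by
        rw [List.getD_eq_getElem?_getD, List.getElem?_eq_getElem ha]
        exact List.getElem_mem ha)
  · rw [pvS, List.set_eq_of_length_le (by omega)]
    exact ⟨hlen, hrow⟩

-- ---- sums over bits ----
theorem pvSB_zero (n : Nat) (W : List Int) : pvSB n W 0 = 0 := by
  simp [pvSB]

theorem pvSB_or (n : Nat) (W : List Int) (mask i : Nat) (hi : i < n) (hb : mask.testBit i = false) :
    pvSB n W (mask ||| 1 <<< i) = pvSB n W mask + pvWgt W i := by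
  unfold pvSB
  have hstep : ∀ j ∈ Finset.range n,
      (if (mask ||| 1 <<< i).testBit j then pvWgt W j else 0)
        = (if mask.testBit j then pvWgt W j else 0) + (if j = i then pvWgt W i else 0) := by
    intro j _
    by_cases hj : j = i
    · subst hj
      have : (1 <<< j : Nat).testBit j = true := by simp [Nat.shiftLeft_eq, Nat.testBit_two_pow]
      simp [Nat.testBit_or, hb, this]
    · have : (1 <<< i : Nat).testBit j = false := by
        simp [Nat.shiftLeft_eq, Nat.testBit_two_pow]
        omega
      simp [Nat.testBit_or, this, hj]
  rw [Finset.sum_congr rfl hstep, Finset.sum_add_distrib, Finset.sum_ite_eq']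
  simp [Finset.mem_range.mpr hi]

theorem pvSB_le (n : Nat) (W : List Int) (hnn : ∀ i, i < n → 0 ≤ pvWgt W i) (mask : Nat) :
    pvSB n W mask ≤ ∑ i ∈ Finset.range n, pvWgt W i := by
  apply Finset.sum_le_sum
  intro i hi
  by_cases h : mask.testBit i <;> simp [h, hnn i (Finset.mem_range.mp hi)]

theorem pvSum_range_take (W : List Int) (n : Nat) (hn : n ≤ W.length) :
    ∑ i ∈ Finset.range n, pvWgt W i = (W.take n).sum := by
  induction n with
  | zero => simp
  | succ k ih =>
    have hkl : k < W.length := by omega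
    rw [Finset.sum_range_succ, ih (by omega)]
    have : pvWgt W k = W[k] := by
      simp [pvWgt, List.getD_eq_getElem?_getD, List.getElem?_eq_getElem hkl]
    rw [this, List.take_add_one, List.sum_append]
    simp [List.getElem?_eq_getElem hkl]

-- ---- generic sum/bit helpers ----
theorem pvListSum (f : Nat → Int) (n : Nat) :
    ((List.range n).map f).sum = ∑ i ∈ Finset.range n, f i := by
  induction n with
  | zero => simp
  | succ k ih =>
    rw [List.range_succ, List.map_append, List.sum_append, Finset.sum_range_succ, ih]
    simp

theorem pvShift_lt (i n : Nat) (hi : i < n) : (1 <<< i : Nat) < 2 ^ n := by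
  rw [Nat.shiftLeft_eq, one_mul]
  exact Nat.pow_lt_pow_right (by omega) hi

theorem pvLt_or (m i : Nat) (hb : m.testBit i = false) : m < m ||| 1 <<< i := by
  refine lt_of_le_of_ne Nat.left_le_or ?_
  intro he
  have h1 : (m ||| 1 <<< i).testBit i = true := by
    simp [Nat.testBit_or, Nat.shiftLeft_eq, Nat.testBit_two_pow]
  rw [← he, hb] at h1
  cases h1

theorem pvRow_sum (row : List Int) : row.sum = ∑ l ∈ Finset.range row.length, row.getD l 0 := by
  induction row with
  | nil => simp
  | cons a tail ih =>
    rw [List.sum_cons, List.length_cons, Finset.sum_range_succ', ih]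
    simp [add_comm]

theorem pvG_replicate (n t m l : Nat) :
    pvG (List.replicate n (List.replicate t (0 : Int))) m l = 0 := by
  unfold pvG
  simp only [List.getD_eq_getElem?_getD, List.getElem?_replicate]
  by_cases hm : m < n <;> by_cases hl : l < t <;> simp [hm, hl]

-- ---- the potential Φ and single '+=' updates ----
theorem pvPhi_bump (n : Nat) (W : List Int) (t lo : Nat) (dp : List (List Int)) (a b : Nat) (v : Int)
    (hs : pvShape n t dp) (hlo : lo ≤ a) (ha : a < 2 ^ n) (hb : b < t + 1) :
    pvPhi n W t lo (pvS dp a b (pvG dp a b + v))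
      = pvPhi n W t lo dp + v * pvC n W a (2 * (b : Int) - pvSB n W a) := by
  have hlen : a < dp.length := by rw [hs.1]; exact ha
  have hmem : dp.getD a [] ∈ dp := by
    rw [List.getD_eq_getElem?_getD, List.getElem?_eq_getElem hlen]
    exact List.getElem_mem hlen
  have hrow : (dp.getD a []).length = t + 1 := hs.2 _ hmem
  have hb' : b < (dp.getD a []).length := by omega
  have hstep : ∀ m ∈ Finset.Ico lo (2 ^ n), ∀ l ∈ Finset.range (t + 1),
      pvG (pvS dp a b (pvG dp a b + v)) m l * pvC n W m (2 * (l : Int) - pvSB n W m)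
        = pvG dp m l * pvC n W m (2 * (l : Int) - pvSB n W m)
          + (if m = a ∧ l = b then v * pvC n W a (2 * (b : Int) - pvSB n W a) else 0) := by
    intro m _ l _
    rw [pvG_pvS dp a b _ hlen hb' m l]
    by_cases h : m = a ∧ l = b
    · rcases h with ⟨h1, h2⟩
      subst h1; subst h2
      simp [add_mul]
    · simp [h]
  unfold pvPhi
  rw [Finset.sum_congr rfl (fun m hm => Finset.sum_congr rfl (fun l hl => hstep m hm l hl))]
  rw [Finset.sum_congr rfl (fun m _ => Finset.sum_add_distrib), Finset.sum_add_distrib]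
  congr 1
  rw [Finset.sum_eq_single_of_mem a (Finset.mem_Ico.mpr ⟨hlo, ha⟩)]
  · rw [Finset.sum_eq_single_of_mem b (Finset.mem_range.mpr hb)]
    · simp
    · intro l _ hne
      simp [hne]
  · intro m _ hne
    apply Finset.sum_eq_zero
    intro l _
    simp [hne]

-- ---- the inner 'for i in range(N)' loop of A ----
theorem pvRowLen (n t : Nat) (dp : List (List Int)) (hs : pvShape n t dp) (a : Nat)
    (ha : a < 2 ^ n) : (dp.getD a []).length = t + 1 := by
  have hlen : a < dp.length := by rw [hs.1]; exact ha
  exact hs.2 _ (by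
    rw [List.getD_eq_getElem?_getD, List.getElem?_eq_getElem hlen]
    exact List.getElem_mem hlen)

theorem pvInnerA_cast (W : List Int) (m l i : Nat) (R : Int) (dp : List (List Int))
    (hnmlen : (m ||| 1 <<< i) < dp.length) (hwnn : 0 ≤ pvWgt W i) :
    pvInnerA W (m : Int) (l : Int) R dp (i : Int) =
      if m.testBit i = false then
        (let dp' := pvS dp (m ||| 1 <<< i) (l + (pvWgt W i).toNat)
            (pvG dp (m ||| 1 <<< i) (l + (pvWgt W i).toNat) + pvG dp m l)
         if R + pvWgt W i ≤ (l : Int) then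
           pvS dp' (m ||| 1 <<< i) l (pvG dp' (m ||| 1 <<< i) l + pvG dp' m l)
         else dp')
      else dp := by
  unfold pvInnerA
  simp only [Int.toNat_natCast]
  by_cases hbit : m.testBit i = false
  · rw [if_pos hbit, if_pos hbit]
    have hwi : PySem.List.pyGetD W (i : Int) 0 = pvWgt W i := by
      rw [PySem.List.pyGetD_natCast]; rfl
    have hcast : (l : Int) + pvWgt W i = ((l + (pvWgt W i).toNat : Nat) : Int) := by
      push_cast [Int.toNat_of_nonneg hwnn]; ring
    rw [hwi, hcast]
    rw [pvGet2_cast dp (m ||| 1 <<< i) (l + (pvWgt W i).toNat), pvGet2_cast dp m l,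
      pvSet2_cast dp (m ||| 1 <<< i) (l + (pvWgt W i).toNat) _ hnmlen]
    have hnmlen' : (m ||| 1 <<< i) < (pvS dp (m ||| 1 <<< i) (l + (pvWgt W i).toNat)
        (pvG dp (m ||| 1 <<< i) (l + (pvWgt W i).toNat) + pvG dp m l)).length := by
      simpa [pvS] using hnmlen
    rw [pvGet2_cast _ (m ||| 1 <<< i) l, pvGet2_cast _ m l, pvSet2_cast _ (m ||| 1 <<< i) l _ hnmlen']
  · rw [if_neg hbit, if_neg hbit]

def pvFoldI (W : List Int) (m l : Nat) (R : Int) (is : List Nat) (dp : List (List Int)) :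
    List (List Int) :=
  is.foldl (fun dp (i : Nat) => pvInnerA W (m : Int) (l : Int) R dp (i : Int)) dp

theorem pvInner_fold (n t : Nat) (W : List Int)
    (hnn : ∀ i, i < n → 0 ≤ pvWgt W i)
    (hts : ∀ mask : Nat, pvSB n W mask ≤ (t : Int))
    (m l : Nat) (hm : m < 2 ^ n) (hl : l < t + 1) (hlb : (l : Int) ≤ pvSB n W m) :
    ∀ (is : List Nat) (dp : List (List Int)), (∀ i ∈ is, i < n) →
      pvShape n t dp → pvSupp n W dp →
      pvShape n t (pvFoldI W m l (pvSB n W m - (l : Int)) is dp) ∧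
      pvSupp n W (pvFoldI W m l (pvSB n W m - (l : Int)) is dp) ∧
      (∀ l' : Nat, pvG (pvFoldI W m l (pvSB n W m - (l : Int)) is dp) m l' = pvG dp m l') ∧
      pvPhi n W t (m + 1) (pvFoldI W m l (pvSB n W m - (l : Int)) is dp)
        = pvPhi n W t (m + 1) dp
          + pvG dp m l * (is.map (pvF n W m (2 * (l : Int) - pvSB n W m))).sum := by
  intro is
  induction is with
  | nil =>
    intro dp _ hsh hsp
    exact ⟨hsh, hsp, fun _ => rfl, by simp [pvFoldI]⟩
  | cons i rest ih =>
    intro dp hall hsh hsp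
    have hi : i < n := hall i (by simp)
    have hwnn : 0 ≤ pvWgt W i := hnn i hi
    have hnm : (m ||| 1 <<< i) < 2 ^ n := Nat.or_lt_two_pow hm (pvShift_lt i n hi)
    have hnmlen : (m ||| 1 <<< i) < dp.length := by rw [hsh.1]; exact hnm
    have hfold : pvFoldI W m l (pvSB n W m - (l : Int)) (i :: rest) dp
        = pvFoldI W m l (pvSB n W m - (l : Int)) rest
            (pvInnerA W (m : Int) (l : Int) (pvSB n W m - (l : Int)) dp (i : Int)) := by
      rfl
    rw [hfold, pvInnerA_cast W m l i _ dp hnmlen hwnn]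
    by_cases hbit : m.testBit i = false
    swap
    · rw [if_neg hbit]
      obtain ⟨s1, s2, s3, s4⟩ := ih dp (fun j hj => hall j (by simp [hj])) hsh hsp
      refine ⟨s1, s2, s3, ?_⟩
      rw [s4, List.map_cons, List.sum_cons]
      have hF : pvF n W m (2 * (l : Int) - pvSB n W m) i = 0 := by
        rw [pvF, if_neg hbit]
      rw [hF]; ring
    · rw [if_pos hbit]
      have hsb : pvSB n W (m ||| 1 <<< i) = pvSB n W m + pvWgt W i := pvSB_or n W m i hi hbit
      have hmnm : m < m ||| 1 <<< i := pvLt_or m i hbit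
      have hj1 : l + (pvWgt W i).toNat < t + 1 := by
        have h1 : ((l + (pvWgt W i).toNat : Nat) : Int) ≤ (t : Int) := by
          push_cast [Int.toNat_of_nonneg hwnn]
          have h2 := hts (m ||| 1 <<< i)
          rw [hsb] at h2
          linarith
        have h2 : l + (pvWgt W i).toNat ≤ t := by exact_mod_cast h1
        omega
      have hb1 : l + (pvWgt W i).toNat < (dp.getD (m ||| 1 <<< i) []).length := by
        rw [pvRowLen n t dp hsh _ hnm]; exact hj1
      have hcast1 : ((l + (pvWgt W i).toNat : Nat) : Int) = (l : Int) + pvWgt W i := by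
        push_cast [Int.toNat_of_nonneg hwnn]; ring
      set nm := m ||| 1 <<< i with hnmdef
      set j1 := l + (pvWgt W i).toNat with hj1def
      set dp' := pvS dp nm j1 (pvG dp nm j1 + pvG dp m l) with hdp'
      have hsh' : pvShape n t dp' := pvShape_pvS n t dp hsh nm j1 _
      have hGrow' : ∀ l', pvG dp' m l' = pvG dp m l' := by
        intro l'
        rw [hdp', pvG_pvS dp nm j1 _ hnmlen hb1 m l', if_neg]
        intro hcon
        omega
      have hsupp' : pvSupp n W dp' := by
        intro a b hne
        rw [hdp', pvG_pvS dp nm j1 _ hnmlen hb1 a b] at hne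
        by_cases hab : a = nm ∧ b = j1
        · rcases hab with ⟨h1, h2⟩
          subst h1; subst h2
          rw [hsb, hcast1]
          linarith
        · rw [if_neg hab] at hne
          exact hsp a b hne
      have hphi1 : pvPhi n W t (m + 1) dp'
          = pvPhi n W t (m + 1) dp
            + pvG dp m l * pvC n W nm (2 * (l : Int) - pvSB n W m + pvWgt W i) := by
        rw [hdp', pvPhi_bump n W t (m + 1) dp nm j1 _ hsh (by omega) hnm hj1]
        congr 2
        rw [hsb, hcast1]
        ring
      by_cases hg : pvSB n W m - (l : Int) + pvWgt W i ≤ (l : Int)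
      · rw [if_pos hg]
        have hguard : pvWgt W i ≤ 2 * (l : Int) - pvSB n W m := by linarith
        have hnmlen' : nm < dp'.length := by
          rw [hsh'.1]; exact hnm
        have hb2 : l < (dp'.getD nm []).length := by
          rw [pvRowLen n t dp' hsh' _ hnm]; omega
        rw [hGrow' l]
        set dp'' := pvS dp' nm l (pvG dp' nm l + pvG dp m l) with hdp''
        have hsh'' : pvShape n t dp'' := pvShape_pvS n t dp' hsh' nm l _
        have hGrow'' : ∀ l', pvG dp'' m l' = pvG dp m l' := by
          intro l'
          rw [hdp'', pvG_pvS dp' nm l _ hnmlen' hb2 m l', if_neg]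
          · exact hGrow' l'
          · intro hcon; omega
        have hsupp'' : pvSupp n W dp'' := by
          intro a b hne
          rw [hdp'', pvG_pvS dp' nm l _ hnmlen' hb2 a b] at hne
          by_cases hab : a = nm ∧ b = l
          · rcases hab with ⟨h1, h2⟩
            subst h1; subst h2
            rw [hsb]
            linarith
          · rw [if_neg hab] at hne
            exact hsupp' a b hne
        have hphi2 : pvPhi n W t (m + 1) dp''
            = pvPhi n W t (m + 1) dp'
              + pvG dp m l * pvC n W nm (2 * (l : Int) - pvSB n W m - pvWgt W i) := by
          rw [hdp'', pvPhi_bump n W t (m + 1) dp' nm l _ hsh' (by omega) hnm hl]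
          congr 2
          rw [hsb]
          ring
        obtain ⟨s1, s2, s3, s4⟩ := ih dp'' (fun j hj => hall j (by simp [hj])) hsh'' hsupp''
        refine ⟨s1, s2, ?_, ?_⟩
        · intro l'
          rw [s3 l', hGrow'' l']
        · rw [s4, hGrow'' l, hphi2, hphi1, List.map_cons, List.sum_cons]
          have hF : pvF n W m (2 * (l : Int) - pvSB n W m) i
              = pvC n W nm (2 * (l : Int) - pvSB n W m + pvWgt W i)
                + pvC n W nm (2 * (l : Int) - pvSB n W m - pvWgt W i) := by
            rw [pvF, if_pos hbit, if_pos hguard]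
          rw [hF]
          ring
      · rw [if_neg hg]
        have hguard : ¬ pvWgt W i ≤ 2 * (l : Int) - pvSB n W m := by
          intro hcon; exact hg (by linarith)
        obtain ⟨s1, s2, s3, s4⟩ := ih dp' (fun j hj => hall j (by simp [hj])) hsh' hsupp'
        refine ⟨s1, s2, ?_, ?_⟩
        · intro l'
          rw [s3 l', hGrow' l']
        · rw [s4, hGrow' l, hphi1, List.map_cons, List.sum_cons]
          have hF : pvF n W m (2 * (l : Int) - pvSB n W m) i
              = pvC n W nm (2 * (l : Int) - pvSB n W m + pvWgt W i) := by
            rw [pvF, if_pos hbit, if_neg hguard]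
            ring
          rw [hF]
          ring

-- ---- the 'for left in range(total_weight+1)' loop and one whole mask iteration ----
theorem pvRight_sum (n : Nat) (W : List Int) (m : Nat) :
    ((PySem.List.pyRange 0 (n : Int) 1).foldl (fun acc i =>
        if (m : Int).toNat.testBit i.toNat then acc + PySem.List.pyGetD W i 0 else acc) 0)
      = pvSB n W m := by
  rw [PySem.List.pyRange_zero_natCast, List.foldl_map]
  rw [PySem.List.foldl_congr_mem _ _
    (fun acc (k : Nat) => acc + (if m.testBit k then pvWgt W k else 0)) _ ?_]
  · rw [PySem.List.foldl_add, pvListSum]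
    simp [pvSB]
  · intro acc k _
    simp only [Int.toNat_natCast, PySem.List.pyGetD_natCast]
    by_cases hb : m.testBit k <;> simp [hb, pvWgt]

theorem pvLeftA_cast (n : Nat) (W : List Int) (m l : Nat) (dp : List (List Int)) :
    pvLeftA (n : Int) W (m : Int) dp (l : Int)
      = if pvG dp m l = 0 then dp
        else pvFoldI W m l (pvSB n W m - (l : Int)) (List.range n) dp := by
  unfold pvLeftA
  rw [pvGet2_cast]
  by_cases h : pvG dp m l = 0
  · rw [if_pos h, if_pos h]
  · rw [if_neg h, if_neg h, pvRight_sum n W m, PySem.List.pyRange_zero_natCast, List.foldl_map]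
    rfl

theorem pvLeft_fold (n t : Nat) (W : List Int)
    (hnn : ∀ i, i < n → 0 ≤ pvWgt W i)
    (hts : ∀ mask : Nat, pvSB n W mask ≤ (t : Int))
    (m : Nat) (hm : m < 2 ^ n) :
    ∀ (ls : List Nat) (dp : List (List Int)), (∀ l ∈ ls, l < t + 1) →
      pvShape n t dp → pvSupp n W dp →
      pvShape n t (ls.foldl (fun dp (l : Nat) => pvLeftA (n : Int) W (m : Int) dp (l : Int)) dp) ∧
      pvSupp n W (ls.foldl (fun dp (l : Nat) => pvLeftA (n : Int) W (m : Int) dp (l : Int)) dp) ∧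
      (∀ l' : Nat, pvG (ls.foldl (fun dp (l : Nat) => pvLeftA (n : Int) W (m : Int) dp (l : Int)) dp) m l'
        = pvG dp m l') ∧
      pvPhi n W t (m + 1) (ls.foldl (fun dp (l : Nat) => pvLeftA (n : Int) W (m : Int) dp (l : Int)) dp)
        = pvPhi n W t (m + 1) dp
          + (ls.map (fun l => pvG dp m l *
              ((List.range n).map (pvF n W m (2 * (l : Int) - pvSB n W m))).sum)).sum := by
  intro ls
  induction ls with
  | nil =>
    intro dp _ hsh hsp
    exact ⟨hsh, hsp, fun _ => rfl, by simp⟩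
  | cons l ls' ih =>
    intro dp hall hsh hsp
    have hl : l < t + 1 := hall l (by simp)
    rw [List.foldl_cons, pvLeftA_cast n W m l dp]
    by_cases hcur : pvG dp m l = 0
    · rw [if_pos hcur]
      obtain ⟨s1, s2, s3, s4⟩ := ih dp (fun j hj => hall j (by simp [hj])) hsh hsp
      refine ⟨s1, s2, s3, ?_⟩
      rw [s4, List.map_cons, List.sum_cons, hcur]
      ring
    · rw [if_neg hcur]
      have hlb : (l : Int) ≤ pvSB n W m := hsp m l hcur
      obtain ⟨i1, i2, i3, i4⟩ := pvInner_fold n t W hnn hts m l hm hl hlb (List.range n) dp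
        (fun j hj => List.mem_range.mp hj) hsh hsp
      obtain ⟨s1, s2, s3, s4⟩ := ih _ (fun j hj => hall j (by simp [hj])) i1 i2
      refine ⟨s1, s2, ?_, ?_⟩
      · intro l'
        rw [s3 l', i3 l']
      · rw [s4, i4, List.map_cons, List.sum_cons]
        have hmap : (ls'.map (fun l' => pvG (pvFoldI W m l (pvSB n W m - (l : Int)) (List.range n) dp) m l' *
              ((List.range n).map (pvF n W m (2 * (l' : Int) - pvSB n W m))).sum)).sum
            = (ls'.map (fun l' => pvG dp m l' *
              ((List.range n).map (pvF n W m (2 * (l' : Int) - pvSB n W m))).sum)).sum := by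
          congr 1
          apply List.map_congr_left
          intro l' _
          rw [i3 l']
        rw [hmap]
        ring

theorem pvMask_step (n t : Nat) (W : List Int)
    (hnn : ∀ i, i < n → 0 ≤ pvWgt W i)
    (hts : ∀ mask : Nat, pvSB n W mask ≤ (t : Int))
    (m : Nat) (hm : m < 2 ^ n - 1) (dp : List (List Int))
    (hsh : pvShape n t dp) (hsp : pvSupp n W dp) :
    pvShape n t ((List.range (t + 1)).foldl
        (fun dp (l : Nat) => pvLeftA (n : Int) W (m : Int) dp (l : Int)) dp) ∧
    pvSupp n W ((List.range (t + 1)).foldl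
        (fun dp (l : Nat) => pvLeftA (n : Int) W (m : Int) dp (l : Int)) dp) ∧
    pvPhi n W t (m + 1) ((List.range (t + 1)).foldl
        (fun dp (l : Nat) => pvLeftA (n : Int) W (m : Int) dp (l : Int)) dp)
      = pvPhi n W t m dp := by
  have hm' : m < 2 ^ n := by
    have := Nat.one_le_two_pow (n := n)
    omega
  obtain ⟨s1, s2, _, s4⟩ := pvLeft_fold n t W hnn hts m hm' (List.range (t + 1)) dp
    (fun j hj => List.mem_range.mp hj) hsh hsp
  refine ⟨s1, s2, ?_⟩
  rw [s4]
  have hrec : ∀ l : Nat, ((List.range n).map (pvF n W m (2 * (l : Int) - pvSB n W m))).sum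
      = pvC n W m (2 * (l : Int) - pvSB n W m) := by
    intro l
    rw [pvC_rec n W m _ (by omega)]
  have hmap : ((List.range (t + 1)).map (fun l => pvG dp m l *
        ((List.range n).map (pvF n W m (2 * (l : Int) - pvSB n W m))).sum)).sum
      = ∑ l ∈ Finset.range (t + 1), pvG dp m l * pvC n W m (2 * (l : Int) - pvSB n W m) := by
    rw [pvListSum]
    apply Finset.sum_congr rfl
    intro l _
    rw [hrec l]
  rw [hmap]
  rw [pvPhi, pvPhi, Finset.sum_eq_sum_Ico_succ_bot hm']
  ring

theorem pvFoldI_full (n : Nat) (W : List Int) (l : Nat) (R : Int) :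
    ∀ (is : List Nat) (dp : List (List Int)), (∀ i ∈ is, i < n) →
      pvFoldI W (2 ^ n - 1) l R is dp = dp := by
  intro is
  induction is with
  | nil => intro dp _; rfl
  | cons i rest ih =>
    intro dp hall
    have hi : i < n := hall i (by simp)
    have hstep : pvInnerA W ((2 ^ n - 1 : Nat) : Int) (l : Int) R dp (i : Int) = dp := by
      unfold pvInnerA
      rw [if_neg (by
        rw [Int.toNat_natCast, Int.toNat_natCast, Nat.testBit_two_pow_sub_one]
        simp [hi])]
    calc pvFoldI W (2 ^ n - 1) l R (i :: rest) dp
        = pvFoldI W (2 ^ n - 1) l R rest (pvInnerA W ((2 ^ n - 1 : Nat) : Int) (l : Int) R dp (i : Int)) := rfl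
      _ = dp := by rw [hstep]; exact ih dp (fun j hj => hall j (by simp [hj]))

theorem pvMask_full_id (n t : Nat) (W : List Int) (dp : List (List Int)) :
    (List.range (t + 1)).foldl
      (fun dp (l : Nat) => pvLeftA (n : Int) W ((2 ^ n - 1 : Nat) : Int) dp (l : Int)) dp = dp := by
  rw [PySem.List.foldl_congr_mem _ _ (fun dp _ => dp) _ ?_]
  · apply PySem.List.foldl_ignore
  · intro acc x _
    rw [pvLeftA_cast n W (2 ^ n - 1) x acc]
    by_cases h : pvG acc (2 ^ n - 1) x = 0
    · rw [if_pos h]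
    · rw [if_neg h]
      exact pvFoldI_full n W x _ (List.range n) acc (fun j hj => List.mem_range.mp hj)

theorem pvMain_fold (n t : Nat) (W : List Int)
    (hnn : ∀ i, i < n → 0 ≤ pvWgt W i)
    (hts : ∀ mask : Nat, pvSB n W mask ≤ (t : Int))
    (dp1 : List (List Int)) (h1 : pvShape n t dp1) (h2 : pvSupp n W dp1)
    (h3 : pvPhi n W t 0 dp1 = pvC n W 0 0) :
    ∀ (k : Nat), k ≤ 2 ^ n - 1 →
      pvShape n t ((List.range k).foldl (fun dp (mk : Nat) =>
        (List.range (t + 1)).foldl (fun dp (l : Nat) => pvLeftA (n : Int) W (mk : Int) dp (l : Int)) dp) dp1) ∧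
      pvSupp n W ((List.range k).foldl (fun dp (mk : Nat) =>
        (List.range (t + 1)).foldl (fun dp (l : Nat) => pvLeftA (n : Int) W (mk : Int) dp (l : Int)) dp) dp1) ∧
      pvPhi n W t k ((List.range k).foldl (fun dp (mk : Nat) =>
        (List.range (t + 1)).foldl (fun dp (l : Nat) => pvLeftA (n : Int) W (mk : Int) dp (l : Int)) dp) dp1)
        = pvC n W 0 0 := by
  intro k
  induction k with
  | zero => intro _; exact ⟨h1, h2, h3⟩
  | succ k ih =>
    intro hk
    obtain ⟨s1, s2, s3⟩ := ih (by omega)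
    rw [show List.range (k+1) = List.range k ++ [k] from List.range_succ, List.foldl_append]
    obtain ⟨m1, m2, m3⟩ := pvMask_step n t W hnn hts k (by omega) _ s1 s2
    simp only [List.foldl_cons, List.foldl_nil]
    exact ⟨m1, m2, by rw [m3, s3]⟩

-- ---- A's value ----
set_option maxRecDepth 10000 in
theorem solve_eq (N : Int) (weights : List Int) (h : Pre_solve N weights) :
    solve N weights = pvC N.toNat weights 0 0 := by
  obtain ⟨hN0, hlen, htake, hdrop⟩ := h
  have hsplit := List.sum_take_add_sum_drop weights N.toNat
  have htake0 : 0 ≤ (weights.take N.toNat).sum := List.sum_nonneg (fun x hx => htake x hx)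
  have htot0 : 0 ≤ weights.sum := by linarith
  have hNcast : N = ((N.toNat : Nat) : Int) := by omega
  set n := N.toNat with hn
  set W := weights with hW
  set t := W.sum.toNat with ht
  have htot : W.sum = (t : Int) := by omega
  have hnn : ∀ i, i < n → 0 ≤ pvWgt W i := by
    intro i hi
    have hiW : i < W.length := by omega
    have hitake : i < (W.take n).length := by
      rw [List.length_take]; omega
    have hmem : (W.take n)[i] ∈ W.take n := List.getElem_mem hitake
    have heq : (W.take n)[i] = W[i] := List.getElem_take
    have hpos := htake _ hmem
    rw [heq] at hpos
    simpa [pvWgt, List.getD_eq_getElem?_getD, List.getElem?_eq_getElem hiW] using hpos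
  have hts : ∀ mask : Nat, pvSB n W mask ≤ (t : Int) := by
    intro mask
    have h1 := pvSB_le n W hnn mask
    rw [pvSum_range_take W n (by omega)] at h1
    rw [← htot]
    linarith
  have hpos : 0 < 2 ^ n := Nat.two_pow_pos n
  have hcastt : (W.sum + 1).toNat = t + 1 := by omega
  set dp0 := List.replicate (2 ^ n) (List.replicate (t + 1) (0 : Int)) with hdp0
  have hsh0 : pvShape n t dp0 := by
    refine ⟨by simp [hdp0], ?_⟩
    intro row hr
    rw [List.eq_of_mem_replicate hr]
    simp
  have hlen0 : (0 : Nat) < dp0.length := by simp [hdp0, hpos]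
  have hrow0 : (0 : Nat) < (dp0.getD 0 []).length := by
    rw [pvRowLen n t dp0 hsh0 0 hpos]
    omega
  set dp1 := pvS dp0 0 0 1 with hdp1
  have hbridge1 : pvSet2 dp0 (0 : Int) (0 : Int) 1 = dp1 := by
    have hh := pvSet2_cast dp0 0 0 1 hlen0
    simpa using hh
  have hG1 : ∀ m l : Nat, pvG dp1 m l = if m = 0 ∧ l = 0 then 1 else 0 := by
    intro m l
    rw [hdp1, pvG_pvS dp0 0 0 1 hlen0 hrow0 m l]
    by_cases hc : m = 0 ∧ l = 0
    · simp [hc]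
    · simp [hc, hdp0, pvG_replicate]
  have hsh1 : pvShape n t dp1 := pvShape_pvS n t dp0 hsh0 0 0 1
  have hsp1 : pvSupp n W dp1 := by
    intro m l hne
    rw [hG1 m l] at hne
    by_cases hc : m = 0 ∧ l = 0
    · rcases hc with ⟨h1, h2⟩
      subst h1; subst h2
      simp [pvSB_zero]
    · simp [hc] at hne
  have hphi1 : pvPhi n W t 0 dp1 = pvC n W 0 0 := by
    unfold pvPhi
    rw [Finset.sum_eq_single_of_mem 0 (Finset.mem_Ico.mpr ⟨Nat.zero_le _, hpos⟩)]
    · rw [Finset.sum_eq_single_of_mem 0 (Finset.mem_range.mpr (by omega))]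
      · rw [hG1 0 0]
        simp [pvSB_zero]
      · intro l _ hlne
        rw [hG1 0 l]
        simp [hlne]
    · intro m _ hmn
      apply Finset.sum_eq_zero
      intro l _
      rw [hG1 m l]
      simp [hmn]
  -- unfold A and bridge its loops to the Nat-level folds
  show (let total := W.sum
        let nMasks : Nat := 2 ^ n
        let dp0' : List (List Int) := List.replicate nMasks (List.replicate (total + 1).toNat 0)
        let dp1' := pvSet2 dp0' 0 0 1
        let dpF := (PySem.List.pyRange 0 (nMasks : Int) 1).foldl
          (fun dp mask => (PySem.List.pyRange 0 (total + 1) 1).foldl (pvLeftA N W mask) dp) dp1'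
        ((PySem.List.pyGet? dpF ((nMasks : Int) - 1)).getD []).sum) = pvC n W 0 0
  simp only [hcastt, ← hdp0, hbridge1]
  rw [PySem.List.pyRange_zero_natCast, List.foldl_map]
  have hfun : (fun (dp : List (List Int)) (mk : Nat) =>
        (PySem.List.pyRange 0 (W.sum + 1) 1).foldl (pvLeftA N W ((mk : Nat) : Int)) dp)
      = (fun dp (mk : Nat) =>
        (List.range (t + 1)).foldl (fun dp (l : Nat) => pvLeftA (n : Int) W (mk : Int) dp (l : Int)) dp) := by
    funext dp mk
    rw [hNcast]
    have hc2 : W.sum + 1 = ((t + 1 : Nat) : Int) := by omega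
    rw [hc2, PySem.List.pyRange_zero_natCast, List.foldl_map]
  rw [hfun]
  have hsucc : 2 ^ n = (2 ^ n - 1) + 1 := by omega
  have hrange : List.range (2 ^ n) = List.range (2 ^ n - 1) ++ [2 ^ n - 1] := by
    conv_lhs => rw [hsucc]
    rw [List.range_succ]
  rw [hrange]
  rw [List.foldl_append]
  simp only [List.foldl_cons, List.foldl_nil]
  obtain ⟨s1, s2, s3⟩ := pvMain_fold n t W hnn hts dp1 hsh1 hsp1 hphi1 (2 ^ n - 1) (le_refl _)
  rw [pvMask_full_id n t W]
  set dpF := (List.range (2 ^ n - 1)).foldl (fun dp (mk : Nat) =>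
    (List.range (t + 1)).foldl (fun dp (l : Nat) => pvLeftA (n : Int) W (mk : Int) dp (l : Int)) dp) dp1 with hdpF
  have hidx : ((2 ^ n : Nat) : Int) - 1 = ((2 ^ n - 1 : Nat) : Int) := by
    omega
  rw [hidx, PySem.List.pyGet?_natCast]
  have hfl : 2 ^ n - 1 < dpF.length := by
    rw [s1.1]
    omega
  rw [List.getElem?_eq_getElem hfl, Option.getD_some]
  have hroweq : dpF[2 ^ n - 1] = dpF.getD (2 ^ n - 1) [] := by
    rw [List.getD_eq_getElem?_getD, List.getElem?_eq_getElem hfl]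
    rfl
  rw [pvRow_sum, hroweq]
  have hrlen : (dpF.getD (2 ^ n - 1) []).length = t + 1 := pvRowLen n t dpF s1 _ (by omega)
  rw [hrlen]
  rw [← s3]
  unfold pvPhi
  have hIco : Finset.Ico (2 ^ n - 1) (2 ^ n) = {2 ^ n - 1} := by
    ext x
    simp only [Finset.mem_Ico, Finset.mem_singleton]
    omega
  rw [hIco, Finset.sum_singleton]
  apply Finset.sum_congr rfl
  intro l _
  rw [pvC_full]
  unfold pvG
  ring

-- ===== VERDICT (by name: the statement is the Claim_ definition above) =====
theorem solve_spec : Claim_equal_solve := by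
  intro N weights _ hPre
  unfold Spec_solve
  rw [solve_eq N weights hPre, solve_alt_eq N weights hPre]
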